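-- pv_equiv track=rewrite | github.com/battez/py_sem1 | main.py | score_line
-- ===== SOURCE A (Python) =====
-- def score(string):
--     '''Find the score of every character in a word.
--     Vowels score extra 10.
--     '''
--     vowels = set('AEIOU')
--     score = list()
--     for idx, char in enumerate(string):
--         if (idx is 0) or (char not in vowels):
--             score.append(idx)
--         else:
--             score.append(idx + 10)
--     return score
--
-- def score_line(line):
--     '''Take a line and for each index calculate the scores
--     for each of its indices (i.e. the chars in those indices),
--     according to the following rules:
--     - index per letter, counting up from zero for word it is in
--     - add 10 to any vowel chars unless they begin a word
--     '''
--     pieces = line.split(' ')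
--     scores_by_char = list()
--     for idx, word in enumerate(pieces):
--         # make a list of scores for each char in word:
--         word_scores = score(word)
--         # if there was a space we put a zero in its place too:
--         if(idx < (len(pieces) - 1)):
--             word_scores.append(0)
--         scores_by_char += word_scores
--     return scores_by_char
-- ===== SOURCE B (Python) =====
-- def score_line(line):
--     res = []
--     pos = 0
--     for ch in line:
--         if ch == ' ':
--             res.append(0)
--             pos = 0
--         else:
--             if pos != 0 and ch in 'AEIOU':
--                 res.append(pos + 10)
--             else:
--                 res.append(pos)
--             pos += 1
--     return res
-- ===== Notes on version B (the rewrite author's own statement) =====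
-- stated objective: simpler
-- what changed: Replaces the split-into-words plus per-word scoring helper plus separator-zero insertion by a single flat scan over the characters that keeps a word-position counter reset at each space.
import Mathlib
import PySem

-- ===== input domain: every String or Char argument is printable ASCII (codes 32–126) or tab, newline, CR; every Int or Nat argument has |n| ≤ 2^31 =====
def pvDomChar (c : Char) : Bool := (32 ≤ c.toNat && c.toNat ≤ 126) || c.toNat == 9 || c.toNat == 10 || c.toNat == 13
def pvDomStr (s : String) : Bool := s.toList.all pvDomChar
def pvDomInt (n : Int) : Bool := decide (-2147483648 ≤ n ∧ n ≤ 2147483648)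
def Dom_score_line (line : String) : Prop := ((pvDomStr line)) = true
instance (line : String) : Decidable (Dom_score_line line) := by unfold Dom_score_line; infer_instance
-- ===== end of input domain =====

-- B replaces split-per-word scoring by one flat scan with a reset position counter (objective: simpler).

-- ===== PORT A =====
-- helper `score(string)`: score each char by its index, +10 for non-initial vowels
def pv_score (s : List Char) : List Int :=
  let vowels := ['A', 'E', 'I', 'O', 'U']
  (PySem.List.enumerate s 0).foldl
    (fun score p =>
      if p.1 = 0 ∨ ¬ (p.2 ∈ vowels) then score ++ [p.1] else score ++ [p.1 + 10]) []

def score_line (line : String) : List Int :=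
  let pieces := PySem.Chars.splitOn line.toList [' ']
  (PySem.List.enumerate pieces 0).foldl
    (fun acc p =>
      let word_scores := pv_score p.2
      let word_scores :=
        if p.1 < (pieces.length : Int) - 1 then word_scores ++ [0] else word_scores
      acc ++ word_scores) []

-- ===== PORT B =====
-- one step of B's loop: state = (res, pos)
def pvAltStep (st : List Int × Int) (ch : Char) : List Int × Int :=
  if ch = ' ' then (st.1 ++ [0], 0)
  else if st.2 ≠ 0 ∧ ch ∈ ['A', 'E', 'I', 'O', 'U'] then (st.1 ++ [st.2 + 10], st.2 + 1)
  else (st.1 ++ [st.2], st.2 + 1)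

def score_line_alt (line : String) : List Int :=
  (line.toList.foldl pvAltStep ([], 0)).1

-- ===== PRECONDITION & SPEC =====
def Spec_score_line (line : String) (out : List Int) : Prop := out = score_line_alt line
instance (line : String) (out : List Int) : Decidable (Spec_score_line line out) := by unfold Spec_score_line; infer_instance

-- ===== CLAIM (what is proved, stated in full; the proofs are below) =====
def Claim_equal_score_line : Prop := ∀ (line : String), Dom_score_line line → Spec_score_line line (score_line line)

-- ===== LEMMAS AND PROOFS =====

-- single-char ' ' splitter (proof-side model of line.split(' '))
def pvSpl : List Char → List (List Char)
  | [] => [[]]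
  | c :: cs =>
    if c = ' ' then [] :: pvSpl cs
    else
      match pvSpl cs with
      | [] => [[c]]
      | w :: ws => (c :: w) :: ws

-- scores of a word's chars at positions pos, pos+1, …
def pvScoreAt : Int → List Char → List Int
  | _, [] => []
  | pos, c :: cs =>
    (if pos = 0 ∨ ¬ (c ∈ ['A', 'E', 'I', 'O', 'U']) then pos else pos + 10) :: pvScoreAt (pos + 1) cs

-- join the word scores with a 0 per space; first word starts at pos
def pvH : Int → List (List Char) → List Int
  | _, [] => []
  | pos, w :: ws => pvScoreAt pos w ++ (match ws with | [] => [] | _ :: _ => 0 :: pvH 0 ws)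

theorem pvSpl_ne_nil (cs : List Char) : pvSpl cs ≠ [] := by
  cases cs with
  | nil => simp [pvSpl]
  | cons c cs =>
    simp only [pvSpl]
    split
    · simp
    · split <;> simp

theorem pv_go_single (l : List Char) : ∀ (fuel : Nat) (cur : List Char) (acc : List (List Char)),
    l.length ≤ fuel →
    PySem.Chars.splitOn.go [' '] fuel l cur acc =
      acc.reverse ++ (match pvSpl l with
        | [] => []
        | w :: ws => (cur.reverse ++ w) :: ws) := by
  induction l with
  | nil =>
    intro fuel cur acc _
    cases fuel <;> simp [PySem.Chars.splitOn.go, pvSpl]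
  | cons c cs ih =>
    intro fuel cur acc hf
    cases fuel with
    | zero => simp at hf
    | succ f =>
      by_cases hc : c = ' '
      · subst hc
        rw [show PySem.Chars.splitOn.go [' '] (f+1) (' ' :: cs) cur acc
              = PySem.Chars.splitOn.go [' '] f cs [] (cur.reverse :: acc) by
            simp [PySem.Chars.splitOn.go, List.isPrefixOf]]
        rw [ih f [] (cur.reverse :: acc) (by simpa using hf)]
        simp only [pvSpl]
        rcases h : pvSpl cs with _ | ⟨w, ws⟩
        · exact absurd h (pvSpl_ne_nil cs)
        · simp
      · rw [show PySem.Chars.splitOn.go [' '] (f+1) (c :: cs) cur acc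
              = PySem.Chars.splitOn.go [' '] f cs (c :: cur) acc by
            simp [PySem.Chars.splitOn.go, List.isPrefixOf, Ne.symm hc]]
        rw [ih f (c :: cur) acc (by simpa using hf)]
        simp only [pvSpl, if_neg hc]
        rcases h : pvSpl cs with _ | ⟨w, ws⟩
        · exact absurd h (pvSpl_ne_nil cs)
        · simp

theorem pv_splitOn_space (cs : List Char) : PySem.Chars.splitOn cs [' '] = pvSpl cs := by
  rw [show PySem.Chars.splitOn cs [' '] = PySem.Chars.splitOn.go [' '] (cs.length + 1) cs [] [] from rfl]
  rw [pv_go_single cs (cs.length + 1) [] [] (by omega)]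
  rcases h : pvSpl cs with _ | ⟨w, ws⟩
  · exact absurd h (pvSpl_ne_nil cs)
  · simp

theorem pv_score_fold (w : List Char) : ∀ (s : Int) (acc : List Int),
    (PySem.List.enumerate w s).foldl
      (fun score p =>
        if p.1 = 0 ∨ ¬ (p.2 ∈ ['A', 'E', 'I', 'O', 'U']) then score ++ [p.1] else score ++ [p.1 + 10]) acc
      = acc ++ pvScoreAt s w := by
  induction w with
  | nil => intro s acc; simp [PySem.List.enumerate_nil, pvScoreAt]
  | cons c cs ih =>
    intro s acc
    rw [PySem.List.enumerate_cons]
    simp only [List.foldl_cons]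
    rw [ih (s + 1)]
    simp only [pvScoreAt]
    split <;> simp

theorem pv_score_eq (w : List Char) : pv_score w = pvScoreAt 0 w := by
  have h := pv_score_fold w 0 []
  rw [List.nil_append] at h
  exact h

theorem pv_foldA (N : Int) (ps : List (List Char)) : ∀ (s : Int) (acc : List Int),
    s + ps.length = N →
    (PySem.List.enumerate ps s).foldl
      (fun acc p =>
        acc ++ (if p.1 < N - 1 then pv_score p.2 ++ [0] else pv_score p.2)) acc
      = acc ++ pvH 0 ps := by
  induction ps with
  | nil => intro s acc _; simp [PySem.List.enumerate_nil, pvH]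
  | cons w ws ih =>
    intro s acc hs
    rw [PySem.List.enumerate_cons]
    simp only [List.foldl_cons]
    rw [ih (s + 1) _ (by simp at hs ⊢; omega)]
    rcases ws with _ | ⟨w', ws'⟩
    · have : ¬ (s < N - 1) := by simp at hs; omega
      simp [this, pvH, pv_score_eq]
    · have : s < N - 1 := by simp at hs; omega
      simp [this, pvH, pv_score_eq]

theorem pv_foldB (cs : List Char) : ∀ (res : List Int) (pos : Int),
    (cs.foldl pvAltStep (res, pos)).1 = res ++ pvH pos (pvSpl cs) := by
  induction cs with
  | nil => intro res pos; simp [pvSpl, pvH, pvScoreAt]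
  | cons c cs ih =>
    intro res pos
    by_cases hc : c = ' '
    · subst hc
      simp only [List.foldl_cons, pvAltStep]
      rw [ih]
      simp only [pvSpl]
      rcases h : pvSpl cs with _ | ⟨w, ws⟩
      · exact absurd h (pvSpl_ne_nil cs)
      · simp [pvH, pvScoreAt]
    · rcases h : pvSpl cs with _ | ⟨w, ws⟩
      · exact absurd h (pvSpl_ne_nil cs)
      · simp only [List.foldl_cons, pvAltStep, if_neg hc]
        by_cases hv : pos ≠ 0 ∧ c ∈ ['A', 'E', 'I', 'O', 'U']
        · rw [if_pos hv, ih]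
          simp only [pvSpl, if_neg hc, h, pvH, pvScoreAt]
          rw [if_neg (by tauto : ¬ (pos = 0 ∨ ¬ (c ∈ ['A', 'E', 'I', 'O', 'U'])))]
          simp
        · rw [if_neg hv, ih]
          simp only [pvSpl, if_neg hc, h, pvH, pvScoreAt]
          rw [if_pos (by tauto : pos = 0 ∨ ¬ (c ∈ ['A', 'E', 'I', 'O', 'U']))]
          simp

-- ===== VERDICT (by name: the statement is the Claim_ definition above) =====
theorem score_line_spec : Claim_equal_score_line := by
  intro line _
  unfold Spec_score_line score_line score_line_alt
  rw [pv_splitOn_space]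
  rw [pv_foldA ((pvSpl line.toList).length : Int) (pvSpl line.toList) 0 [] (by simp)]
  rw [pv_foldB line.toList [] 0]
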